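-- pv_equiv track=rewrite | github.com/Rheology-and-Processing-of-Soft-Matter/RPSM_MuDRaW_v5.7 | PLI_engine.py | trim_leading_empty_columns
-- ===== SOURCE A (Python) =====
-- from typing import List, Tuple, Optional, Dict
--
-- def trim_leading_empty_columns(rows: List[List[str]], sample_rows: int = 300) -> List[List[str]]:
--     """Remove leading columns that are empty ("", "[]", "[ ]") in the first `sample_rows` rows."""
--     if not rows:
--         return rows
--     maxlen = max(len(r) for r in rows)
--     first_non_empty = None
--     for j in range(maxlen):
--         for r in rows[:sample_rows]:
--             cell = (r[j] if j < len(r) else '').strip()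
--             if cell not in ('', '[]', '[ ]'):
--                 first_non_empty = j
--                 break
--         if first_non_empty is not None:
--             break
--     if first_non_empty in (None, 0):
--         return rows
--     return [ (r[first_non_empty:] if isinstance(r, list) else r) for r in rows ]
-- ===== SOURCE B (Python) =====
-- from typing import List
--
-- _EMPTY = ('', '[]', '[ ]')
--
-- def trim_leading_empty_columns(rows: List[List[str]], sample_rows: int = 300) -> List[List[str]]:
--     """Row-major rewrite: each sampled row is scanned once for its first
--     non-empty cell; the answer is the running minimum of those indices."""
--     best = None
--     for r in rows[:sample_rows]:
--         for i, cell in enumerate(r):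
--             if cell.strip() not in _EMPTY:
--                 best = i if best is None else min(best, i)
--                 break
--     if best in (None, 0):
--         return rows
--     return [r[best:] for r in rows]
-- ===== Notes on version B (the rewrite author's own statement) =====
-- stated objective: alternative
-- what changed: Replaced A's column-major search (re-scanning all sampled rows for each leading column until one column hits) by a single row-major pass that finds each sampled row's first non-empty cell and keeps the running minimum of those indices.
import Mathlib
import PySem

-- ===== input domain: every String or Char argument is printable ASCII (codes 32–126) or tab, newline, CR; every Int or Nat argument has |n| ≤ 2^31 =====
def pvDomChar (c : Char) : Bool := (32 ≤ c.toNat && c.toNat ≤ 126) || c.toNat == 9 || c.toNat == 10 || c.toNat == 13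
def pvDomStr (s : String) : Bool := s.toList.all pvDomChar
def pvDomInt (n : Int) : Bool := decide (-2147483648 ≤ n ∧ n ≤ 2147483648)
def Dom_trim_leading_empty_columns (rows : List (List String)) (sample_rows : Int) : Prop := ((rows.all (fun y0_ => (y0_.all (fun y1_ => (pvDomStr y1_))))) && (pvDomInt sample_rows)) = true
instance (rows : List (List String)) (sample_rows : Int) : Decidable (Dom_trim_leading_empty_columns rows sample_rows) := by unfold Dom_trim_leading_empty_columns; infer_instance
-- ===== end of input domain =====

-- B replaces A's column-major rescan (every sampled row re-read for each leading column)
-- by a single row-major pass keeping a running minimum of each row's first-non-empty index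
-- (objective: alternative decomposition, one pass over the sampled cells).

-- ===== PORT A =====
-- cell = (r[j] if j < len(r) else '').strip() not in ('', '[]', '[ ]')  — cell-emptiness test
def pvEmptyCell (s : String) : Bool :=
  let cell := PySem.Str.strip s
  cell == "" || cell == "[]" || cell == "[ ]"

def pvCell (r : List String) (j : Nat) : String :=
  if j < r.length then r.getD j "" else ""

-- inner loop: "for r in rows[:sample_rows]: … break" — true iff some row hits column j
def pvScanRows (rs : List (List String)) (j : Nat) : Bool :=
  match rs with
  | [] => false
  | r :: rest => if pvEmptyCell (pvCell r j) then pvScanRows rest j else true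

-- outer loop: "for j in range(maxlen): … break"
def pvScanCols (sample : List (List String)) (maxlen j : Nat) : Option Nat :=
  if j < maxlen then
    if pvScanRows sample j then some j else pvScanCols sample maxlen (j + 1)
  else none
termination_by maxlen - j

def trim_leading_empty_columns (rows : List (List String)) (sample_rows : Int) : List (List String) :=
  if rows.isEmpty then rows
  else
    let maxlen := rows.foldl (fun m r => max m r.length) 0
    let sample := PySem.List.slice rows none (some sample_rows)
    match pvScanCols sample maxlen 0 with
    | none => rows
    | some 0 => rows
    | some k => rows.map (fun r => PySem.List.slice r (some (k : Int)) none)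

-- ===== PORT B =====
-- cell.strip() not in _EMPTY
def pvEmptyCellB (s : String) : Bool :=
  (["", "[]", "[ ]"] : List String).contains (PySem.Str.strip s)

-- "for i, cell in enumerate(r): … break" — first non-empty index of one row
def pvRowFirstAux (r : List String) (i : Nat) : Option Nat :=
  match r with
  | [] => none
  | c :: cs => if pvEmptyCellB c then pvRowFirstAux cs (i + 1) else some i

-- best = i if best is None else min(best, i)
def pvMinOpt (a b : Option Nat) : Option Nat :=
  match a, b with
  | none, x => x
  | some m, none => some m
  | some m, some n => some (min m n)

-- the row-major loop: running minimum over the sampled rows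
def pvMinFirst (rs : List (List String)) : Option Nat :=
  rs.foldl (fun acc r => pvMinOpt acc (pvRowFirstAux r 0)) none

def trim_leading_empty_columns_alt (rows : List (List String)) (sample_rows : Int) : List (List String) :=
  let sample := PySem.List.slice rows none (some sample_rows)
  match pvMinFirst sample with
  | none => rows
  | some 0 => rows
  | some k => rows.map (fun r => PySem.List.slice r (some (k : Int)) none)

-- ===== PRECONDITION & SPEC =====
def Spec_trim_leading_empty_columns (rows : List (List String)) (sample_rows : Int) (out : List (List String)) : Prop := out = trim_leading_empty_columns_alt rows sample_rows
instance (rows : List (List String)) (sample_rows : Int) (out : List (List String)) : Decidable (Spec_trim_leading_empty_columns rows sample_rows out) := by unfold Spec_trim_leading_empty_columns; infer_instance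

-- ===== CLAIM (what is proved, stated in full; the proofs are below) =====
def Claim_equal_trim_leading_empty_columns : Prop := ∀ (rows : List (List String)) (sample_rows : Int), Dom_trim_leading_empty_columns rows sample_rows → Spec_trim_leading_empty_columns rows sample_rows (trim_leading_empty_columns rows sample_rows)

-- ===== LEMMAS AND PROOFS =====

-- o is the least index satisfying P (none if there is none)
def pvLeast (P : Nat → Bool) (o : Option Nat) : Prop :=
  match o with
  | none => ∀ j, P j = false
  | some n => P n = true ∧ ∀ m, m < n → P m = false

theorem pvLeast_unique {P : Nat → Bool} {o₁ o₂ : Option Nat}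
    (h₁ : pvLeast P o₁) (h₂ : pvLeast P o₂) : o₁ = o₂ := by
  cases o₁ with
  | none =>
    cases o₂ with
    | none => rfl
    | some n => exact absurd h₂.1 (by simp [h₁ n])
  | some m =>
    cases o₂ with
    | none => exact absurd h₁.1 (by simp [h₂ m])
    | some n =>
      rcases Nat.lt_trichotomy m n with h | h | h
      · exact absurd h₁.1 (by simp [h₂.2 m h])
      · simp [h]
      · exact absurd h₂.1 (by simp [h₁.2 n h])

theorem pvLeast_congr {P Q : Nat → Bool} {o : Option Nat}
    (h : pvLeast P o) (hpq : ∀ j, P j = Q j) : pvLeast Q o := by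
  cases o with
  | none => intro j; rw [← hpq]; exact h j
  | some n => exact ⟨by rw [← hpq]; exact h.1, fun m hm => by rw [← hpq]; exact h.2 m hm⟩

theorem pvEmptyCellB_eq (s : String) : pvEmptyCellB s = pvEmptyCell s := by
  simp only [pvEmptyCellB, pvEmptyCell, List.contains_cons, List.contains_nil,
    Bool.or_false, Bool.or_assoc]

theorem pvEmptyCell_empty : pvEmptyCell "" = true := by decide

theorem pvCell_cons (c : String) (cs : List String) (j : Nat) :
    pvCell (c :: cs) (j + 1) = pvCell cs j := by
  simp [pvCell]

theorem pvCell_cons_zero (c : String) (cs : List String) :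
    pvCell (c :: cs) 0 = c := by
  simp [pvCell]

theorem pvCell_of_ge (r : List String) (j : Nat) (h : r.length ≤ j) :
    pvCell r j = "" := by
  simp [pvCell]; omega

theorem pvRowFirstAux_shift (r : List String) (i : Nat) :
    pvRowFirstAux r i = (pvRowFirstAux r 0).map (fun n => n + i) := by
  induction r generalizing i with
  | nil => rfl
  | cons c cs ih =>
    by_cases h : pvEmptyCellB c = true
    · rw [pvRowFirstAux, if_pos h, pvRowFirstAux, if_pos h, ih (i + 1), ih 1,
        Option.map_map]
      congr 1; funext n; simp; omega
    · rw [pvRowFirstAux, if_neg h, pvRowFirstAux, if_neg h]; simp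

theorem pvRowFirst_least (r : List String) :
    pvLeast (fun j => !pvEmptyCell (pvCell r j)) (pvRowFirstAux r 0) := by
  induction r with
  | nil =>
    intro j
    simp [pvCell_of_ge [] j (by simp), pvEmptyCell_empty]
  | cons c cs ih =>
    by_cases h : pvEmptyCellB c = true
    · have hc : pvEmptyCell c = true := pvEmptyCellB_eq c ▸ h
      rw [pvRowFirstAux, if_pos h, pvRowFirstAux_shift cs 1]
      cases ho : pvRowFirstAux cs 0 with
      | none =>
        have ih' := ho ▸ ih
        intro j
        cases j with
        | zero => simp [pvCell_cons_zero, hc]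
        | succ j => simp only [pvCell_cons]; exact ih' j
      | some n =>
        have ih' := ho ▸ ih
        simp only [Option.map_some]
        refine ⟨by simp only [pvCell_cons]; exact ih'.1, ?_⟩
        intro m hm
        cases m with
        | zero => simp [pvCell_cons_zero, hc]
        | succ m =>
          simp only [pvCell_cons]
          exact ih'.2 m (by omega)
    · have hc : pvEmptyCell c = false := by
        rw [← pvEmptyCellB_eq]; simpa using h
      rw [pvRowFirstAux, if_neg h]
      refine ⟨by simp [pvCell_cons_zero, hc], ?_⟩
      intro m hm; omega

theorem pvMinOpt_least {P Q : Nat → Bool} {a b : Option Nat}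
    (ha : pvLeast P a) (hb : pvLeast Q b) :
    pvLeast (fun j => P j || Q j) (pvMinOpt a b) := by
  cases a with
  | none =>
    cases b with
    | none => intro j; simp [ha j, hb j]
    | some n =>
      exact ⟨by simp [hb.1], fun m hm => by simp [ha m, hb.2 m hm]⟩
  | some m =>
    cases b with
    | none =>
      exact ⟨by simp [ha.1], fun k hk => by simp [ha.2 k hk, hb k]⟩
    | some n =>
      refine ⟨?_, ?_⟩
      · rcases Nat.le_total m n with h | h
        · simp [Nat.min_eq_left h, ha.1]
        · simp [Nat.min_eq_right h, hb.1]
      · intro k hk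
        have hk' : k < min m n := hk
        simp [ha.2 k (by omega), hb.2 k (by omega)]

-- B's running-minimum fold computes the least column hit by any sampled row
theorem pvMinFirst_foldl (s : List (List String)) :
    ∀ (acc : Option Nat) (P : Nat → Bool), pvLeast P acc →
    pvLeast (fun j => P j || s.any (fun r => !pvEmptyCell (pvCell r j)))
      (s.foldl (fun a r => pvMinOpt a (pvRowFirstAux r 0)) acc) := by
  induction s with
  | nil =>
    intro acc P hP
    exact pvLeast_congr hP (by simp)
  | cons r rest ih =>
    intro acc P hP
    have h1 := pvMinOpt_least hP (pvRowFirst_least r)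
    have h2 := ih _ _ h1
    refine pvLeast_congr h2 ?_
    intro j; simp [Bool.or_assoc]

theorem pvMinFirst_least (s : List (List String)) :
    pvLeast (fun j => s.any (fun r => !pvEmptyCell (pvCell r j))) (pvMinFirst s) := by
  have := pvMinFirst_foldl s none (fun _ => false) (fun j => rfl)
  exact pvLeast_congr this (by simp)

theorem pvScanRows_eq_any (rs : List (List String)) (j : Nat) :
    pvScanRows rs j = rs.any (fun r => !pvEmptyCell (pvCell r j)) := by
  induction rs with
  | nil => rfl
  | cons r rest ih =>
    rw [pvScanRows]
    by_cases h : pvEmptyCell (pvCell r j) = true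
    · simp [h, ih]
    · have h' : pvEmptyCell (pvCell r j) = false := by simpa using h
      simp [h']

-- A's column loop finds the least hit column, provided every hit is below maxlen
theorem pvScanCols_least (s : List (List String)) (m : Nat)
    (hb : ∀ k, pvScanRows s k = true → k < m) :
    ∀ j, (∀ k, k < j → pvScanRows s k = false) →
    pvLeast (fun k => pvScanRows s k) (pvScanCols s m j) := by
  intro j
  induction hd : m - j generalizing j with
  | zero =>
    intro hlow
    have hjm : ¬ j < m := by omega
    rw [pvScanCols, if_neg hjm]
    intro k
    by_contra hk
    have : pvScanRows s k = true := by simpa using hk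
    have := hb k this
    have := hlow k (by omega)
    simp_all
  | succ d ih =>
    intro hlow
    have hjm : j < m := by omega
    rw [pvScanCols, if_pos hjm]
    by_cases h : pvScanRows s j = true
    · rw [if_pos h]; exact ⟨h, hlow⟩
    · rw [if_neg h]
      refine ih (j + 1) (by omega) ?_
      intro k hk
      rcases Nat.lt_or_ge k j with h' | h'
      · exact hlow k h'
      · have : k = j := by omega
        subst this; simpa using h

theorem pvFoldlMax_le (l : List (List String)) :
    ∀ (init : Nat), (∀ r ∈ l, r.length ≤ l.foldl (fun m r => max m r.length) init) ∧
      init ≤ l.foldl (fun m r => max m r.length) init := by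
  induction l with
  | nil => intro init; simp
  | cons r rest ih =>
    intro init
    have h := ih (max init r.length)
    refine ⟨?_, ?_⟩
    · intro x hx
      rcases hx with _ | hx
      · exact le_trans (le_max_right init r.length) h.2
      · exact h.1 x (by assumption)
    · exact le_trans (le_max_left init r.length) h.2

-- ===== VERDICT (by name: the statement is the Claim_ definition above) =====
theorem trim_leading_empty_columns_spec : Claim_equal_trim_leading_empty_columns := by
  intro rows sample_rows _
  unfold Spec_trim_leading_empty_columns
  by_cases hrows : rows = []
  · subst hrows
    have hs : PySem.List.slice ([] : List (List String)) none (some sample_rows) = [] := by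
      rw [List.eq_nil_iff_forall_not_mem]
      intro x hx
      exact absurd (PySem.List.mem_of_mem_slice _ _ _ hx) (by simp)
    simp [trim_leading_empty_columns, trim_leading_empty_columns_alt, hs, pvMinFirst]
  · have hne : rows.isEmpty = false := by simpa [List.isEmpty_iff] using hrows
    set maxlen := rows.foldl (fun m r => max m r.length) 0 with hml
    set sample := PySem.List.slice rows none (some sample_rows) with hsmp
    have hb : ∀ k, pvScanRows sample k = true → k < maxlen := by
      intro k hk
      rw [pvScanRows_eq_any] at hk
      rcases List.any_eq_true.mp hk with ⟨r, hr, hcell⟩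
      have hlen : k < r.length := by
        by_contra h
        rw [pvCell_of_ge r k (by omega), pvEmptyCell_empty] at hcell
        simp at hcell
      have hmem : r ∈ rows := PySem.List.mem_of_mem_slice _ _ _ hr
      have := (pvFoldlMax_le rows 0).1 r hmem
      omega
    have hA : pvLeast (fun k => pvScanRows sample k) (pvScanCols sample maxlen 0) :=
      pvScanCols_least sample maxlen hb 0 (by intro k hk; omega)
    have hB : pvLeast (fun k => pvScanRows sample k) (pvMinFirst sample) :=
      pvLeast_congr (pvMinFirst_least sample) (by intro j; rw [pvScanRows_eq_any])
    have heq : pvScanCols sample maxlen 0 = pvMinFirst sample := pvLeast_unique hA hB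
    unfold trim_leading_empty_columns trim_leading_empty_columns_alt
    rw [if_neg (by simp [hne])]
    simp only [← hml, ← hsmp, heq]
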